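-- pv_equiv track=rewrite | github.com/vuxthag/Bigdata | backend/app/services/cv_analyzer.py | detect_job_level
-- ===== SOURCE A (Python) =====
-- JOB_LEVEL_ORDER = {
--     "intern": 0, "thực tập": 0, "internship": 0,
--     "fresher": 1, "entry": 1, "junior": 1, "mới ra trường": 1,
--     "nhân viên": 2, "staff": 2, "associate": 2,
--     "mid": 3, "middle": 3, "intermediate": 3,
--     "senior": 4, "chuyên viên": 4, "experienced": 4,
--     "lead": 5, "team lead": 5, "trưởng nhóm": 5,
--     "manager": 6, "quản lý": 6, "trưởng phòng": 6,
--     "director": 7, "giám đốc": 7, "phó giám đốc": 7,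
--     "vp": 8, "vice president": 8,
--     "c-level": 9, "cto": 9, "ceo": 9, "cfo": 9, "coo": 9,
-- }
--
-- def detect_job_level(text: str) -> str | None:
--     """Detect the job level/seniority from CV text."""
--     if not text:
--         return None
--     lower = text.lower()
--     best_level: str | None = None
--     best_order = -1
--     for keyword, order in JOB_LEVEL_ORDER.items():
--         if keyword in lower and order > best_order:
--             best_level = keyword
--             best_order = order
--     return best_level
-- ===== SOURCE B (Python) =====
-- # Compact table of keyword buckets per level, highest level first; each bucket
-- # keeps the original dict-insertion order of its keywords, '|'-joined.
-- LEVELS_DESC = [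
--     "c-level|cto|ceo|cfo|coo",
--     "vp|vice president",
--     "director|giám đốc|phó giám đốc",
--     "manager|quản lý|trưởng phòng",
--     "lead|team lead|trưởng nhóm",
--     "senior|chuyên viên|experienced",
--     "mid|middle|intermediate",
--     "nhân viên|staff|associate",
--     "fresher|entry|junior|mới ra trường",
--     "intern|thực tập|internship",
-- ]
--
--
-- def detect_job_level(text: str) -> str | None:
--     """Detect the job level/seniority from CV text."""
--     if not text:
--         return None
--     lower = text.lower()
--     for bucket in LEVELS_DESC:
--         for keyword in bucket.split("|"):
--             if keyword in lower:
--                 return keyword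
--     return None
-- ===== Notes on version B (the rewrite author's own statement) =====
-- stated objective: alternative
-- what changed: A scans the flat keyword->order dict tracking the best order seen; B stores the keywords as a descending list of per-level buckets and scans from the highest level down, returning the first substring hit (early exit), with no order bookkeeping.
import Mathlib
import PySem

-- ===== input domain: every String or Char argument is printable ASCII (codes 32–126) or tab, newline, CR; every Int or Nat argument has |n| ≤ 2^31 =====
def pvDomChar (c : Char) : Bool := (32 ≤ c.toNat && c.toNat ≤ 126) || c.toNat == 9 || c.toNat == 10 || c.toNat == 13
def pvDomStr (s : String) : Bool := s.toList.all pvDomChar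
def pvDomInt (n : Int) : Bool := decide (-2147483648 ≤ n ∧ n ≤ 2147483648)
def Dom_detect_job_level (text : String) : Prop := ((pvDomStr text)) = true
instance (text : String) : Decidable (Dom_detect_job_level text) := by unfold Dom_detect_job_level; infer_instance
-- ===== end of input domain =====

-- B replaces A's best-order-tracking scan of the flat keyword->order dict by a
-- descending per-level bucket table scanned highest level first with early exit;
-- objective: alternative decomposition (same asymptotic cost).

-- ===== PORT A =====
-- JOB_LEVEL_ORDER.items() (keys unique, insertion order)
def pvItems : List (String × Int) :=
  [("intern", 0), ("thực tập", 0), ("internship", 0),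
   ("fresher", 1), ("entry", 1), ("junior", 1), ("mới ra trường", 1),
   ("nhân viên", 2), ("staff", 2), ("associate", 2),
   ("mid", 3), ("middle", 3), ("intermediate", 3),
   ("senior", 4), ("chuyên viên", 4), ("experienced", 4),
   ("lead", 5), ("team lead", 5), ("trưởng nhóm", 5),
   ("manager", 6), ("quản lý", 6), ("trưởng phòng", 6),
   ("director", 7), ("giám đốc", 7), ("phó giám đốc", 7),
   ("vp", 8), ("vice president", 8),
   ("c-level", 9), ("cto", 9), ("ceo", 9), ("cfo", 9), ("coo", 9)]

-- the body of A's for-loop: if keyword in lower and order > best_order: update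
def pvStepA (lower : String) (s : Option String × Int) (p : String × Int) :
    Option String × Int :=
  if PySem.Str.isIn p.1 lower && decide (s.2 < p.2) then (some p.1, p.2) else s

def detect_job_level (text : String) : Option String :=
  if text = "" then none
  else
    let lower := PySem.Str.lower text
    (pvItems.foldl (pvStepA lower) (none, -1)).1

-- ===== PORT B =====
-- LEVELS_DESC: '|'-joined buckets, highest level first
def pvLevelsDesc : List String :=
  ["c-level|cto|ceo|cfo|coo",
   "vp|vice president",
   "director|giám đốc|phó giám đốc",
   "manager|quản lý|trưởng phòng",
   "lead|team lead|trưởng nhóm",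
   "senior|chuyên viên|experienced",
   "mid|middle|intermediate",
   "nhân viên|staff|associate",
   "fresher|entry|junior|mới ra trường",
   "intern|thực tập|internship"]

-- the nested for-loops with early return: first keyword of the first bucket that hits.
-- bucket.split("|") = PySem.Str.split? bucket "|" (none only for sep = "", so .getD [] is exact)
def pvScanB (lower : String) : List String → Option String
  | [] => none
  | bucket :: rest =>
    match ( (PySem.Str.split? bucket "|").getD []).find? (fun k => PySem.Str.isIn k lower) with
    | some k => some k
    | none => pvScanB lower rest

def detect_job_level_alt (text : String) : Option String :=
  if text = "" then none
  else pvScanB (PySem.Str.lower text) pvLevelsDesc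

-- ===== PRECONDITION & SPEC =====
def Spec_detect_job_level (text : String) (out : Option String) : Prop := out = detect_job_level_alt text
instance (text : String) (out : Option String) : Decidable (Spec_detect_job_level text out) := by unfold Spec_detect_job_level; infer_instance

-- ===== CLAIM (what is proved, stated in full; the proofs are below) =====
def Claim_equal_detect_job_level : Prop := ∀ (text : String), Dom_detect_job_level text → Spec_detect_job_level text (detect_job_level text)

-- ===== LEMMAS AND PROOFS =====

-- proof-side: the ascending grouped view of A's items
def pvGroupsAsc : List (Int × List String) :=
  [(0, ["intern", "thực tập", "internship"]),
   (1, ["fresher", "entry", "junior", "mới ra trường"]),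
   (2, ["nhân viên", "staff", "associate"]),
   (3, ["mid", "middle", "intermediate"]),
   (4, ["senior", "chuyên viên", "experienced"]),
   (5, ["lead", "team lead", "trưởng nhóm"]),
   (6, ["manager", "quản lý", "trưởng phòng"]),
   (7, ["director", "giám đốc", "phó giám đốc"]),
   (8, ["vp", "vice president"]),
   (9, ["c-level", "cto", "ceo", "cfo", "coo"])]

-- proof-side scan over explicit (order, keywords) groups
def pvScanG (lower : String) : List (Int × List String) → Option String
  | [] => none
  | (_, kws) :: rest =>
    match kws.find? (fun k => PySem.Str.isIn k lower) with
    | some k => some k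
    | none => pvScanG lower rest

-- A's loop over one equal-order group, state already at that order: no update
theorem pvFold_group_stay (lower : String) (o : Int) (K : List String)
    (s : Option String × Int) (h : o ≤ s.2) :
    (K.map (fun k => (k, o))).foldl (pvStepA lower) s = s := by
  induction K with
  | nil => rfl
  | cons k K ih =>
    simp only [List.map, List.foldl]
    have hd : decide (s.2 < o) = false := decide_eq_false (not_lt.mpr h)
    have : pvStepA lower s (k, o) = s := by simp [pvStepA, hd]
    rw [this, ih]

-- A's loop over one equal-order group from a strictly lower state: the first
-- present keyword of the group wins (or nothing changes)
theorem pvFold_group (lower : String) (o : Int) (K : List String)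
    (s : Option String × Int) (h : s.2 < o) :
    (K.map (fun k => (k, o))).foldl (pvStepA lower) s =
      match K.find? (fun k => PySem.Str.isIn k lower) with
      | some k => (some k, o)
      | none => s := by
  induction K with
  | nil => rfl
  | cons k K ih =>
    simp only [List.map, List.foldl, List.find?]
    cases hk : PySem.Str.isIn k lower with
    | true =>
      have hk' : PySem.Chars.isIn k.toList lower.toList = true := by simpa using hk
      have hs : pvStepA lower s (k, o) = (some k, o) := by
        simp [pvStepA, hk', h]
      rw [hs, pvFold_group_stay lower o K (some k, o) (le_refl o)]
    | false =>
      have hk' : PySem.Chars.isIn k.toList lower.toList = false := by simpa using hk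
      have hs : pvStepA lower s (k, o) = s := by simp [pvStepA, hk']
      rw [hs, ih]

theorem pvScanG_append (lower : String) (xs ys : List (Int × List String)) :
    pvScanG lower (xs ++ ys) =
      (pvScanG lower xs).orElse (fun _ => pvScanG lower ys) := by
  induction xs with
  | nil => rfl
  | cons g xs ih =>
    obtain ⟨o, kws⟩ := g
    simp only [List.cons_append, pvScanG]
    cases kws.find? (fun k => PySem.Str.isIn k lower) with
    | some k => rfl
    | none => simpa using ih

-- the main correspondence: A's ascending fold over the grouped keywords equals
-- the descending first-match scan
theorem pvMain (lower : String) (gs : List (Int × List String))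
    (s : Option String × Int) (hs : ∀ g ∈ gs, s.2 < g.1)
    (hp : gs.Pairwise (fun a b => a.1 < b.1)) :
    ((gs.map (fun g => g.2.map (fun k => (k, g.1)))).flatten.foldl
        (pvStepA lower) s).1 =
      (pvScanG lower gs.reverse).orElse (fun _ => s.1) := by
  induction gs generalizing s with
  | nil => simp [pvScanG]
  | cons g gs ih =>
    obtain ⟨o, K⟩ := g
    simp only [List.map_cons, List.flatten_cons, List.foldl_append, List.reverse_cons]
    rw [pvFold_group lower o K s (hs (o, K) (by simp))]
    rw [pvScanG_append]
    have hsingle : pvScanG lower [(o, K)] =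
        K.find? (fun k => PySem.Str.isIn k lower) := by
      simp only [pvScanG]
      cases K.find? (fun k => PySem.Str.isIn k lower) <;> rfl
    rw [hsingle]
    rcases List.pairwise_cons.mp hp with ⟨hhead, htail⟩
    cases hf : K.find? (fun k => PySem.Str.isIn k lower) with
    | some k =>
      rw [ih (some k, o) (fun g hg => hhead g hg) htail]
      cases pvScanG lower gs.reverse <;> rfl
    | none =>
      rw [ih s (fun g hg => hs g (by simp [hg])) htail]
      cases pvScanG lower gs.reverse <;> rfl

-- B's bucket scan equals the group scan whenever the split buckets match the groups
theorem pvScanB_eq_scanG (lower : String) :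
    ∀ (bs : List String) (gs : List (Int × List String)),
      bs.map (fun b => (PySem.Str.split? b "|").getD []) = gs.map (fun g => g.2) →
      pvScanB lower bs = pvScanG lower gs
  | [], [], _ => rfl
  | b :: bs, (o, kws) :: gs, h => by
    simp only [List.map_cons, List.cons.injEq] at h
    simp only [pvScanB, pvScanG, h.1]
    cases kws.find? (fun k => PySem.Str.isIn k lower) with
    | some k => rfl
    | none => exact pvScanB_eq_scanG lower bs gs h.2

theorem pvItems_grouped :
    pvItems = (pvGroupsAsc.map (fun g => g.2.map (fun k => (k, g.1)))).flatten := by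
  decide

theorem pvLevels_split :
    pvLevelsDesc.map (fun b => (PySem.Str.split? b "|").getD []) =
      pvGroupsAsc.reverse.map (fun g => g.2) := by
  decide

-- ===== VERDICT (by name: the statement is the Claim_ definition above) =====
theorem detect_job_level_spec : Claim_equal_detect_job_level := by
  intro text _
  unfold Spec_detect_job_level detect_job_level detect_job_level_alt
  by_cases h : text = ""
  · simp [h]
  · simp only [if_neg h]
    rw [pvItems_grouped]
    rw [pvMain (PySem.Str.lower text) pvGroupsAsc (none, -1) (by decide) (by decide)]
    rw [pvScanB_eq_scanG (PySem.Str.lower text) pvLevelsDesc pvGroupsAsc.reverse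
        pvLevels_split]
    cases pvScanG (PySem.Str.lower text) pvGroupsAsc.reverse <;> rfl
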